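-- pv_equiv track=rewrite | github.com/nitzel/discord-tak-bot | board/board.py | split_by_counts
-- ===== SOURCE A (Python) =====
-- from typing import Dict, List, Tuple, TypeVar
--
-- T = TypeVar('T')
--
-- def split_by_counts(array: List[T], counts: List[int]) -> List[List[T]]:
--     if sum(counts) != len(array):
--         raise ValueError(f"Cannot split list with {len(array)} items into {len(counts)} groups with an accumulated size of {sum(counts)}")
--
--     groups: List[List[T]] = []
--     already_taken = 0
--     for to_take in counts:
--         groups.append(array[already_taken: already_taken + to_take])
--         already_taken += to_take
--     return groups
-- ===== SOURCE B (Python) =====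
-- from typing import List, TypeVar
--
-- T = TypeVar('T')
--
-- def _go(array: List[T], counts: List[int], end: int) -> List[List[T]]:
--     # build the groups back-to-front: peel the LAST group off the tail of the
--     # array (it ends at `end` and holds the last count), recurse on the rest
--     if not counts:
--         return []
--     t = counts[-1]
--     return _go(array, counts[:-1], end - t) + [array[end - t: end]]
--
-- def split_by_counts(array: List[T], counts: List[int]) -> List[List[T]]:
--     if sum(counts) != len(array):
--         raise ValueError(f"Cannot split list with {len(array)} items into {len(counts)} groups with an accumulated size of {sum(counts)}")
--     return _go(array, counts, len(array))
-- ===== Notes on version B (the rewrite author's own statement) =====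
-- stated objective: alternative
-- what changed: Replaces the forward loop threading a running prefix offset with a recursion that builds the result back-to-front, peeling the last group off the array's tail at a shrinking end index (suffix sums instead of prefix sums).
import Mathlib
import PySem

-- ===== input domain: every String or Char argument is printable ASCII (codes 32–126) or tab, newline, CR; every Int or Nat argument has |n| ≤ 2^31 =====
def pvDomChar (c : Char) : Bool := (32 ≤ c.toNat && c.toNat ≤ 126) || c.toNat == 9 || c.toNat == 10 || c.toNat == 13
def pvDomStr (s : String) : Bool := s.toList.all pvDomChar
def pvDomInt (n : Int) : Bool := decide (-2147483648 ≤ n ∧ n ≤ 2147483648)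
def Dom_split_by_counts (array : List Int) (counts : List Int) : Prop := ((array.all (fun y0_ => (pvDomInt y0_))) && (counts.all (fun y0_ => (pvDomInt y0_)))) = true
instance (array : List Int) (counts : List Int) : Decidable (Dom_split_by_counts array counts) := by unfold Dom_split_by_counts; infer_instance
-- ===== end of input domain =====

-- B builds the result back-to-front by recursion on the counts' last element (suffix sums),
-- instead of A's forward loop threading a running prefix offset (alternative decomposition).

-- ===== PORT A =====
-- A raises ValueError when sum(counts) != len(array); those inputs are outside Pre_.
def split_by_counts (array : List Int) (counts : List Int) : List (List Int) :=
  if counts.sum ≠ (array.length : Int) then [] else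
  (counts.foldl
    (fun (st : List (List Int) × Int) to_take =>
      (st.1 ++ [PySem.List.slice array (some st.2) (some (st.2 + to_take))], st.2 + to_take))
    ([], 0)).1

-- ===== PORT B =====
def pvGo (array : List Int) (counts : List Int) (e : Int) : List (List Int) :=
  match counts with
  | [] => []
  | c :: cs =>
      let t := (c :: cs).getLast (by simp)
      pvGo array (c :: cs).dropLast (e - t) ++ [PySem.List.slice array (some (e - t)) (some e)]
termination_by counts.length
decreasing_by simp

def split_by_counts_alt (array : List Int) (counts : List Int) : List (List Int) :=
  if counts.sum ≠ (array.length : Int) then [] else pvGo array counts (array.length : Int)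

-- ===== PRECONDITION & SPEC =====
-- A raises ValueError exactly when the counts do not sum to the array's length.
def Pre_split_by_counts (array : List Int) (counts : List Int) : Prop :=
  counts.sum = (array.length : Int)
instance (array : List Int) (counts : List Int) : Decidable (Pre_split_by_counts array counts) := by unfold Pre_split_by_counts; infer_instance
def pvWitness_split_by_counts : List Int × List Int := ([5, 6, 7], [1, 2])

def Spec_split_by_counts (array : List Int) (counts : List Int) (out : List (List Int)) : Prop := out = split_by_counts_alt array counts
instance (array : List Int) (counts : List Int) (out : List (List Int)) : Decidable (Spec_split_by_counts array counts out) := by unfold Spec_split_by_counts; infer_instance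

-- ===== CLAIM (what is proved, stated in full; the proofs are below) =====
def Claim_equal_split_by_counts : Prop := ∀ (array : List Int) (counts : List Int), Dom_split_by_counts array counts → Pre_split_by_counts array counts → Spec_split_by_counts array counts (split_by_counts array counts)

-- ===== LEMMAS AND PROOFS =====

-- forward chunk list at prefix offsets (proof-only reference shape)
def pvFwd (array : List Int) (counts : List Int) (s : Int) : List (List Int) :=
  match counts with
  | [] => []
  | t :: ts => PySem.List.slice array (some s) (some (s + t)) :: pvFwd array ts (s + t)

-- A's loop equals the forward chunk list.
theorem a_eq_fwd (array : List Int) :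
    ∀ (counts : List Int) (acc : List (List Int)) (s : Int),
      (counts.foldl
        (fun (st : List (List Int) × Int) to_take =>
          (st.1 ++ [PySem.List.slice array (some st.2) (some (st.2 + to_take))], st.2 + to_take))
        (acc, s)).1 = acc ++ pvFwd array counts s := by
  intro counts
  induction counts with
  | nil => intro acc s; simp [pvFwd]
  | cons t ts ih => intro acc s; simp [pvFwd, ih, List.append_assoc]

-- appending one count to the forward chunk list appends one slice at the accumulated offset
theorem fwd_concat (array : List Int) :
    ∀ (cs : List Int) (t s : Int),
      pvFwd array (cs ++ [t]) s
        = pvFwd array cs s ++ [PySem.List.slice array (some (s + cs.sum)) (some (s + cs.sum + t))] := by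
  intro cs
  induction cs with
  | nil => intro t s; simp [pvFwd]
  | cons c cs ih =>
    intro t s
    simp only [List.cons_append, pvFwd, ih, List.sum_cons, Int.add_assoc]

-- B's back-to-front recursion equals the forward chunk list started at e - sum.
theorem go_eq_fwd (array : List Int) (counts : List Int) :
    ∀ (e : Int), pvGo array counts e = pvFwd array counts (e - counts.sum) := by
  induction counts using List.reverseRecOn with
  | nil => intro e; simp [pvGo, pvFwd]
  | append_singleton cs t ih =>
    intro e
    cases cs with
    | nil => simp [pvGo, pvFwd]
    | cons c cs' =>
      rw [show (c :: cs') ++ [t] = c :: (cs' ++ [t]) by simp]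
      rw [pvGo]
      have ht : (c :: (cs' ++ [t])).getLast (by simp) = t := by simp
      simp only [ht, List.dropLast_cons_of_ne_nil (by simp : cs' ++ [t] ≠ []),
        List.dropLast_concat]
      rw [ih]
      have hs : e - (c :: (cs' ++ [t])).sum = e - t - (c :: cs').sum := by simp; ring
      rw [show c :: (cs' ++ [t]) = (c :: cs') ++ [t] from by simp] at hs ⊢
      rw [hs, fwd_concat,
        show e - t - (c :: cs').sum + (c :: cs').sum + t = e by ring,
        show e - t - (c :: cs').sum + (c :: cs').sum = e - t by ring]

theorem split_by_counts_spec : Claim_equal_split_by_counts := by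
  intro array counts _ hpre
  unfold Spec_split_by_counts split_by_counts split_by_counts_alt
  split
  · rfl
  · rw [go_eq_fwd, hpre]
    simpa using a_eq_fwd array counts [] 0
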